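-- pv_equiv track=rewrite | github.com/igic01/Automatic-Detection-of-Sensitive-Data | app/backend/scripts/ocr.py | _line_text_and_offsets
-- ===== SOURCE A (Python) =====
-- def _line_text_and_offsets(tokens):
--     parts = []
--     offsets = []
--     pos = 0
--     for idx, token in enumerate(tokens):
--         if parts:
--             parts.append(" ")
--             pos += 1
--         start = pos
--         text = token["text"]
--         parts.append(text)
--         pos += len(text)
--         offsets.append((start, pos, idx))
--     return "".join(parts), offsets
-- ===== SOURCE B (Python) =====
-- def _line_text_and_offsets(tokens):
--     # Right fold: process tokens back-to-front; no running position counter.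
--     # Each step prepends its token (offset (0, len)) and shifts the whole
--     # suffix solution right by len(text) + 1 (token plus the joining space).
--     text = ""
--     offsets = []
--     for token in reversed(tokens):
--         t = token["text"]
--         if offsets:
--             text = t + " " + text
--         else:
--             text = t
--         shift = len(t) + 1
--         offsets = [(0, len(t), 0)] + [(s + shift, e + shift, i + 1) for (s, e, i) in offsets]
--     return text, offsets
-- ===== Notes on version B (the rewrite author's own statement) =====
-- stated objective: alternative
-- what changed: Replaces A's forward pass with a running position counter by a right fold over the tokens with no position counter at all: each step prepends its token with offset (0, len) and shifts the entire suffix solution (offsets and indices) right by len+1, rebuilding the offsets list; the text is assembled by prepending as well.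
import Mathlib
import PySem

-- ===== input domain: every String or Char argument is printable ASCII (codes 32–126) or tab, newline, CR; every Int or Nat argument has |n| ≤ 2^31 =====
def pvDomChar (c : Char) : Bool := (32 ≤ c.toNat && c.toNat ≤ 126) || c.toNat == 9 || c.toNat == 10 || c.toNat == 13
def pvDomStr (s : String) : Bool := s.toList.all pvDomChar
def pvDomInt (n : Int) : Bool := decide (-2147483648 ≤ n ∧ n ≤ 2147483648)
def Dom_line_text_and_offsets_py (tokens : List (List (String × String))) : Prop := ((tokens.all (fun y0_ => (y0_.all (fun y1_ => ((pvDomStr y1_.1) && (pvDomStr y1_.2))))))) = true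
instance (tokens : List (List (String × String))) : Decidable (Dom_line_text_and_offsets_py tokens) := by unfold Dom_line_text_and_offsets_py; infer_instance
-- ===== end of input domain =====

-- B replaces A's forward pass with a running position counter by a right fold with no counter:
-- each step prepends its token at offset (0, len) and shifts the whole suffix solution by len+1.

-- ===== PORT A =====
-- A's enumerate loop, as structural recursion over the same state (parts, offsets, pos);
-- token["text"] is first-match association-list lookup; Pre_ excludes the KeyError case, so .getD "" never fires inside Pre_.
def goA_lto : Int → List (List (String × String)) → (List String × List (Int × Int × Int) × Int) → (List String × List (Int × Int × Int) × Int)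
  | _, [], st => st
  | idx, token :: rest, (parts, offsets, pos) =>
      let parts1 := if parts.isEmpty then parts else parts ++ [" "]
      let pos1 := if parts.isEmpty then pos else pos + 1
      let start := pos1
      let text := (token.lookup "text").getD ""
      let parts2 := parts1 ++ [text]
      let pos2 := pos1 + PySem.Str.len text
      goA_lto (idx + 1) rest (parts2, offsets ++ [(start, pos2, idx)], pos2)

def line_text_and_offsets_py (tokens : List (List (String × String))) : String × (List (Int × Int × Int)) :=
  let st := goA_lto 0 tokens ([], [], 0)
  (PySem.Str.join "" st.1, st.2.1)

-- ===== PORT B =====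
-- B's 'for token in reversed(tokens)' accumulator loop is exactly a right fold over the list,
-- ported as structural recursion; the Python concatenation t + " " + text is ported exactly as
-- PySem.Str.join "" [t, " ", text].
def line_text_and_offsets_py_alt : List (List (String × String)) → String × (List (Int × Int × Int))
  | [] => ("", [])
  | token :: rest =>
      let p := line_text_and_offsets_py_alt rest
      let t := (token.lookup "text").getD ""
      let text := if p.2.isEmpty then t else PySem.Str.join "" [t, " ", p.1]
      let shift := PySem.Str.len t + 1
      (text, (0, PySem.Str.len t, 0) :: p.2.map (fun q => (q.1 + shift, q.2.1 + shift, q.2.2 + 1)))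

-- ===== PRECONDITION & SPEC =====
-- Pre_ excludes exactly the tokens lacking a "text" key, on which A (and B) raise KeyError.
def Pre_line_text_and_offsets_py (tokens : List (List (String × String))) : Prop :=
  ∀ t ∈ tokens, (t.lookup "text").isSome = true
instance (tokens : List (List (String × String))) : Decidable (Pre_line_text_and_offsets_py tokens) := by unfold Pre_line_text_and_offsets_py; infer_instance

def pvWitness_line_text_and_offsets_py : (List (List (String × String))) := [[("text", "ab")], [("text", "c")]]

def Spec_line_text_and_offsets_py (tokens : List (List (String × String))) (out : String × (List (Int × Int × Int))) : Prop := out = line_text_and_offsets_py_alt tokens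
instance (tokens : List (List (String × String))) (out : String × (List (Int × Int × Int))) : Decidable (Spec_line_text_and_offsets_py tokens out) := by unfold Spec_line_text_and_offsets_py; infer_instance

-- ===== CLAIM (what is proved, stated in full; the proofs are below) =====
def Claim_equal_line_text_and_offsets_py : Prop := ∀ (tokens : List (List (String × String))), Dom_line_text_and_offsets_py tokens → Pre_line_text_and_offsets_py tokens → Spec_line_text_and_offsets_py tokens (line_text_and_offsets_py tokens)

-- ===== LEMMAS AND PROOFS =====

-- common characterisation of the offsets: token k starts at pos, the next at pos + len + 1
def offsSpec_lto : Int → Int → List Int → List (Int × Int × Int)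
  | _, _, [] => []
  | k, pos, L :: rest => (pos, pos + L, k) :: offsSpec_lto (k + 1) (pos + L + 1) rest

def getText_lto (t : List (String × String)) : String := (t.lookup "text").getD ""

lemma offsSpec_lto_shift (lens : List Int) :
    ∀ (k pos c : Int),
    (offsSpec_lto k pos lens).map (fun q => (q.1 + c, q.2.1 + c, q.2.2 + 1)) =
      offsSpec_lto (k + 1) (pos + c) lens := by
  induction lens with
  | nil => intro k pos c; rfl
  | cons L rest ih =>
    intro k pos c
    simp only [offsSpec_lto, List.map_cons, ih]
    ring_nf

lemma goA_lto_spec (rest : List (List (String × String))) :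
    ∀ (idx : Int) (parts : List String) (offsets : List (Int × Int × Int)) (pos : Int),
    parts ≠ [] →
    goA_lto idx rest (parts, offsets, pos) =
      (parts ++ rest.flatMap (fun t => [" ", getText_lto t]),
       offsets ++ offsSpec_lto idx (pos + 1) (rest.map (fun t => PySem.Str.len (getText_lto t))),
       pos + (rest.map (fun t => PySem.Str.len (getText_lto t) + 1)).sum) := by
  induction rest with
  | nil => intro idx parts offsets pos _; simp [goA_lto, offsSpec_lto]
  | cons t ts ih =>
    intro idx parts offsets pos hne
    have hie : parts.isEmpty = false := by simpa [List.isEmpty_iff] using hne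
    simp only [goA_lto, hie, if_false, Bool.false_eq_true]
    rw [ih (idx + 1) _ _ _ (by simp)]
    simp [offsSpec_lto, getText_lto, List.flatMap_cons]
    ring

lemma join_space_lto (x : String) (l : List String) :
    PySem.Str.join "" (x :: l.flatMap (fun t => [" ", t])) = PySem.Str.join " " (x :: l) := by
  induction l generalizing x with
  | nil => rfl
  | cons y ys ih =>
    have h1 := PySem.Str.toList_join "" (x :: (y :: ys).flatMap (fun t => [" ", t]))
    have h2 := PySem.Str.toList_join " " (x :: y :: ys)
    have hrec := congrArg String.toList (ih y)
    rw [PySem.Str.toList_join] at hrec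
    apply String.toList_inj.mp
    rw [h1, h2]
    simp only [List.flatMap_cons, List.map_cons, List.map_append, List.map_nil, List.cons_append]
    rw [PySem.Chars.join_cons_cons, PySem.Chars.join_cons_cons, PySem.Chars.join_cons_cons]
    simp only [List.map_cons] at hrec
    simp only [List.nil_append]
    rw [hrec, PySem.Str.toList_join]
    simp

-- B computes the canonical form: the space-join of the texts and offsSpec of the lengths
lemma altB_canon (tokens : List (List (String × String))) :
    line_text_and_offsets_py_alt tokens =
      (PySem.Str.join " " (tokens.map getText_lto),
       offsSpec_lto 0 0 (tokens.map (fun t => PySem.Str.len (getText_lto t)))) := by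
  induction tokens with
  | nil => rfl
  | cons t rest ih =>
    simp only [line_text_and_offsets_py_alt, ih, List.map_cons]
    cases rest with
    | nil =>
      simp only [List.map_nil, offsSpec_lto, List.isEmpty_nil, if_true, List.map_nil]
      refine Prod.ext ?_ (by simp [getText_lto])
      · show getText_lto t = PySem.Str.join " " [getText_lto t]
        apply String.toList_inj.mp
        rw [PySem.Str.toList_join]
        simp [PySem.Chars.join_singleton, getText_lto]
    | cons u us =>
      have hne : (offsSpec_lto 0 0 ((u :: us).map (fun t => PySem.Str.len (getText_lto t)))).isEmpty = false := by
        simp [List.map_cons, offsSpec_lto]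
      simp only [hne, Bool.false_eq_true, if_false]
      refine Prod.ext ?_ ?_
      · show PySem.Str.join "" [getText_lto t, " ", PySem.Str.join " " ((u :: us).map getText_lto)]
            = PySem.Str.join " " (getText_lto t :: (u :: us).map getText_lto)
        apply String.toList_inj.mp
        rw [PySem.Str.toList_join, PySem.Str.toList_join]
        simp only [List.map_cons]
        rw [PySem.Chars.join_cons_cons, PySem.Chars.join_cons_cons, PySem.Chars.join_cons_cons]
        simp only [List.map_nil]
        rw [PySem.Chars.join_singleton, PySem.Str.toList_join]
        simp
      · show (0, PySem.Str.len (getText_lto t), 0) ::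
            (offsSpec_lto 0 0 ((u :: us).map (fun t => PySem.Str.len (getText_lto t)))).map
              (fun q => (q.1 + (PySem.Str.len (getText_lto t) + 1), q.2.1 + (PySem.Str.len (getText_lto t) + 1), q.2.2 + 1))
            = offsSpec_lto 0 0 (PySem.Str.len (getText_lto t) :: (u :: us).map (fun t => PySem.Str.len (getText_lto t)))
        rw [offsSpec_lto_shift]
        simp [offsSpec_lto]

lemma lookup_getText (t : List (String × String)) : (t.lookup "text").getD "" = getText_lto t := rfl

-- ===== VERDICT (by name: the statement is the Claim_ definition above) =====
theorem line_text_and_offsets_py_spec : Claim_equal_line_text_and_offsets_py := by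
  intro tokens _ _
  unfold Spec_line_text_and_offsets_py line_text_and_offsets_py
  rw [altB_canon]
  cases tokens with
  | nil => rfl
  | cons t ts =>
    simp only [goA_lto, List.isEmpty_nil, if_true, List.nil_append]
    rw [goA_lto_spec ts (0 + 1) [(t.lookup "text").getD ""] [(0, 0 + PySem.Str.len ((t.lookup "text").getD ""), 0)] (0 + PySem.Str.len ((t.lookup "text").getD "")) (by simp)]
    simp only [lookup_getText, List.map_cons]
    simp only [List.singleton_append, offsSpec_lto, Prod.mk.injEq]
    refine ⟨?_, ?_⟩
    · simpa [List.flatMap_map, Function.comp_def] using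
        join_space_lto (getText_lto t) (ts.map (fun t => getText_lto t))
    · simp
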